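-- pv_equiv track=rewrite | github.com/wkazmierczak/Introduction_to_Computer_Science_AGH_UST_course | kolokwia/20_zad_5.py | trojki
-- ===== SOURCE A (Python) =====
-- def NWD(a, b):
--     while b != 0:
--         a, b = b, a % b
--     return a
--
-- def trojki(T):
--     N = len(T)
--     counter = 0
--     for i in range(N):
--         for x in range(1, 3):
--             for y in range(1, 3):
--                 if x + i + y >= N or i+x >= N or i+y >= N:
--                     continue
--                 if NWD(T[i], T[i+x+y]) == 1 and NWD(T[i+x], T[i+x+y]) == 1 and NWD(T[i], T[i+x]) == 1:
--                     counter += 1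
--     return counter
-- ===== SOURCE B (Python) =====
-- def NWD(a, b):
--     while b != 0:
--         a, b = b, a % b
--     return a
--
-- def trojki(T):
--     N = len(T)
--     # pass 1: pairwise coprimality tables, cop[d][j] == (NWD(T[j], T[j+d]) == 1)
--     cop = [[NWD(T[j], T[j + d]) == 1 for j in range(N - d)] for d in range(5)]
--     # pass 2: count triples (i, i+x, i+x+y) using the tables only
--     total = 0
--     for x in (1, 2):
--         for y in (1, 2):
--             for i in range(N - x - y):
--                 if cop[x][i] and cop[y][i + x] and cop[x + y][i]:
--                     total += 1
--     return total
-- ===== Notes on version B (the rewrite author's own statement) =====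
-- stated objective: alternative
-- what changed: B separates the work into two passes: it first builds pairwise-coprimality tables cop[d][j] = (NWD(T[j],T[j+d])==1) for offsets d=1..4, then counts in a second traversal with the (x,y) offset pair in the outer loops and i inside, reading only table entries; A recomputes the gcds inside a triple nested i/x/y loop with a combined bounds guard.
import Mathlib
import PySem

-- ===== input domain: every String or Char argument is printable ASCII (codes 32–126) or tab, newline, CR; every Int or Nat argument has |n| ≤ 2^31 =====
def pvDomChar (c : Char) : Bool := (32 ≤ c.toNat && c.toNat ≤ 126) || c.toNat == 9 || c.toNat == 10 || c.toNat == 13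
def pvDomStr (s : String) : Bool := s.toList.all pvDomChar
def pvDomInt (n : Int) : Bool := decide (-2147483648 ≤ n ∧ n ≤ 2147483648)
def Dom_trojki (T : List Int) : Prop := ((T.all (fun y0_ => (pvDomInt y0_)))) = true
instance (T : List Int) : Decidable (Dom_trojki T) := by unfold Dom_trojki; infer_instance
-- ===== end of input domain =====

-- B builds pairwise-coprimality tables in a first pass, then counts (x,y) pairs over them; same results, alternative decomposition.

-- termination fact for the Euclidean loop of NWD (cited by nwd's decreasing_by)
theorem nwd_dec (a b : Int) (h : ¬ b = 0) : (PySem.Int.mod a b).natAbs < b.natAbs := by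
  rcases lt_or_gt_of_ne h with hb | hb
  · have h1 := PySem.Int.mod_neg_bounds a hb
    omega
  · have h1 := PySem.Int.mod_nonneg a hb
    have h2 := PySem.Int.mod_lt a hb
    omega

-- shared helper NWD (identical in A and Source B): Python's while-loop gcd with Python's % (sign of the divisor)
def nwd (a b : Int) : Int :=
  if h : b = 0 then a else nwd b (PySem.Int.mod a b)
termination_by b.natAbs
decreasing_by exact nwd_dec a b h

-- ===== PORT A =====
def trojki (T : List Int) : Int :=
  let N : Int := T.length
  (PySem.List.pyRange 0 N 1).foldl (fun counter i =>
    (PySem.List.pyRange 1 3 1).foldl (fun counter x =>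
      (PySem.List.pyRange 1 3 1).foldl (fun counter y =>
        if x + i + y ≥ N ∨ i + x ≥ N ∨ i + y ≥ N then counter
        else if nwd (PySem.List.pyGetD T i 0) (PySem.List.pyGetD T (i + x + y) 0) = 1 ∧
                nwd (PySem.List.pyGetD T (i + x) 0) (PySem.List.pyGetD T (i + x + y) 0) = 1 ∧
                nwd (PySem.List.pyGetD T i 0) (PySem.List.pyGetD T (i + x) 0) = 1
             then counter + 1 else counter) counter) counter) 0

-- ===== PORT B =====
def trojki_alt (T : List Int) : Int :=
  let N : Int := T.length
  -- pass 1: cop[d][j] = (NWD(T[j], T[j+d]) == 1)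
  let cop : List (List Bool) := (PySem.List.pyRange 0 5 1).map (fun d =>
    (PySem.List.pyRange 0 (N - d) 1).map (fun j =>
      decide (nwd (PySem.List.pyGetD T j 0) (PySem.List.pyGetD T (j + d) 0) = 1)))
  -- pass 2: count using the tables only
  [(1 : Int), 2].foldl (fun total x =>
    [(1 : Int), 2].foldl (fun total y =>
      (PySem.List.pyRange 0 (N - x - y) 1).foldl (fun total i =>
        if (PySem.List.pyGetD (PySem.List.pyGetD cop x []) i false &&
            PySem.List.pyGetD (PySem.List.pyGetD cop y []) (i + x) false &&
            PySem.List.pyGetD (PySem.List.pyGetD cop (x + y) []) i false) = true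
        then total + 1 else total) total) total) 0

-- ===== PRECONDITION & SPEC =====
def Spec_trojki (T : List Int) (out : Int) : Prop := out = trojki_alt T
instance (T : List Int) (out : Int) : Decidable (Spec_trojki T out) := by unfold Spec_trojki; infer_instance

-- ===== CLAIM (what is proved, stated in full; the proofs are below) =====
def Claim_equal_trojki : Prop := ∀ (T : List Int), Dom_trojki T → Spec_trojki T (trojki T)

-- ===== LEMMAS AND PROOFS =====

-- the coprimality test on the triple (i, i+x, i+x+y), in A's conjunct order
abbrev triCond (T : List Int) (x y i : Int) : Prop :=
  nwd (PySem.List.pyGetD T i 0) (PySem.List.pyGetD T (i + x + y) 0) = 1 ∧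
  nwd (PySem.List.pyGetD T (i + x) 0) (PySem.List.pyGetD T (i + x + y) 0) = 1 ∧
  nwd (PySem.List.pyGetD T i 0) (PySem.List.pyGetD T (i + x) 0) = 1

def indT (T : List Int) (x y i : Int) : Int := if triCond T x y i then 1 else 0

def cnt (T : List Int) (x y : Int) : Int :=
  ((PySem.List.pyRange 0 ((T.length : Int) - x - y) 1).map (indT T x y)).sum

-- guarded sum over range 0 N equals the sum over range 0 m, for m ≤ N
theorem sum_guard (m N : Int) (f : Int → Int) (hmN : m ≤ N) :
    ((PySem.List.pyRange 0 N 1).map (fun i => if i < m then f i else 0)).sum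
      = ((PySem.List.pyRange 0 m 1).map f).sum := by
  by_cases hm : m ≤ 0
  · rw [PySem.List.pyRange_one_eq_nil hm]
    have h0 : ∀ i ∈ PySem.List.pyRange 0 N 1, (if i < m then f i else 0) = (fun _ => (0:Int)) i := by
      intro i hi
      have := (PySem.List.mem_pyRange_one).1 hi
      simp only
      rw [if_neg (by omega)]
    rw [List.map_congr_left h0]
    simp
  · rw [PySem.List.pyRange_one_append 0 m N (by omega) hmN, List.map_append, List.sum_append]
    have h1 : ∀ i ∈ PySem.List.pyRange 0 m 1, (if i < m then f i else 0) = f i := by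
      intro i hi
      have := (PySem.List.mem_pyRange_one).1 hi
      rw [if_pos (by omega)]
    have h2 : ∀ i ∈ PySem.List.pyRange m N 1, (if i < m then f i else 0) = (fun _ => (0:Int)) i := by
      intro i hi
      have := (PySem.List.mem_pyRange_one).1 hi
      simp only
      rw [if_neg (by omega)]
    rw [List.map_congr_left h1, List.map_congr_left h2]
    simp

theorem pyRange13 : PySem.List.pyRange 1 3 1 = [1, 2] := by decide

-- one (x,y) block of A's inner loops, rewritten as 'counter + guarded indicator'
theorem Astep (N c : Int) (P : Prop) [Decidable P] (x y i : Int) (hx : 1 ≤ x) (hy : 1 ≤ y) :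
    (if x + i + y ≥ N ∨ i + x ≥ N ∨ i + y ≥ N then c else if P then c + 1 else c)
      = c + (if i < N - x - y then (if P then (1 : Int) else 0) else 0) := by
  split_ifs <;> omega

-- cnt as a countP
theorem cnt_eq_countP (T : List Int) (x y : Int) :
    cnt T x y
      = ((PySem.List.pyRange 0 ((T.length : Int) - x - y) 1).countP
          (fun i => decide (triCond T x y i)) : Int) := by
  rw [cnt, ← PySem.List.sum_map_ite_one_zero]
  refine congrArg List.sum (List.map_congr_left ?_)
  intro i _
  simp [indT]

-- one (x,y) block of B's counting pass, over the tables, equals 'total + cnt'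
theorem Bblock (T : List Int) (x y : Int) (hx1 : 1 ≤ x) (hx2 : x ≤ 2) (hy1 : 1 ≤ y) (hy2 : y ≤ 2)
    (t : Int) :
    (PySem.List.pyRange 0 ((T.length : Int) - x - y) 1).foldl (fun total i =>
        if (PySem.List.pyGetD (PySem.List.pyGetD ((PySem.List.pyRange 0 5 1).map (fun d =>
              (PySem.List.pyRange 0 ((T.length : Int) - d) 1).map (fun j =>
                decide (nwd (PySem.List.pyGetD T j 0) (PySem.List.pyGetD T (j + d) 0) = 1)))) x []) i false &&
            PySem.List.pyGetD (PySem.List.pyGetD ((PySem.List.pyRange 0 5 1).map (fun d =>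
              (PySem.List.pyRange 0 ((T.length : Int) - d) 1).map (fun j =>
                decide (nwd (PySem.List.pyGetD T j 0) (PySem.List.pyGetD T (j + d) 0) = 1)))) y []) (i + x) false &&
            PySem.List.pyGetD (PySem.List.pyGetD ((PySem.List.pyRange 0 5 1).map (fun d =>
              (PySem.List.pyRange 0 ((T.length : Int) - d) 1).map (fun j =>
                decide (nwd (PySem.List.pyGetD T j 0) (PySem.List.pyGetD T (j + d) 0) = 1)))) (x + y) []) i false) = true
        then total + 1 else total) t
      = t + cnt T x y := by
  rw [PySem.List.foldl_congr_mem _ _ (fun total i => if triCond T x y i then total + 1 else total) t ?_]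
  · rw [PySem.List.foldl_ite_add_one, cnt_eq_countP]
  · intro acc i hi
    have hmem := PySem.List.mem_pyRange_one.1 hi
    rw [PySem.List.pyGetD_map_pyRange_of_nonneg _ 5 x _ (by omega) (by omega),
        PySem.List.pyGetD_map_pyRange_of_nonneg _ 5 y _ (by omega) (by omega),
        PySem.List.pyGetD_map_pyRange_of_nonneg _ 5 (x + y) _ (by omega) (by omega),
        PySem.List.pyGetD_map_pyRange_of_nonneg _ _ i _ (by omega) (by omega),
        PySem.List.pyGetD_map_pyRange_of_nonneg _ _ (i + x) _ (by omega) (by omega),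
        PySem.List.pyGetD_map_pyRange_of_nonneg _ _ i _ (by omega) (by omega)]
    have hassoc : i + (x + y) = i + x + y := by ring
    rw [hassoc]
    refine if_congr ?_ rfl rfl
    simp only [Bool.and_eq_true, decide_eq_true_eq, triCond]
    tauto

-- A equals the sum of the four per-offset counts
theorem trojki_eq_cnt (T : List Int) :
    trojki T = cnt T 1 1 + cnt T 1 2 + cnt T 2 1 + cnt T 2 2 := by
  unfold trojki
  simp only [pyRange13, List.foldl_cons, List.foldl_nil]
  rw [PySem.List.foldl_congr_mem _ _ (fun c i => c +
      ((if i < (T.length : Int) - 1 - 1 then indT T 1 1 i else 0) +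
       (if i < (T.length : Int) - 1 - 2 then indT T 1 2 i else 0) +
       (if i < (T.length : Int) - 2 - 1 then indT T 2 1 i else 0) +
       (if i < (T.length : Int) - 2 - 2 then indT T 2 2 i else 0))) 0 ?_]
  · rw [PySem.List.foldl_add, PySem.List.sum_map_add_int, PySem.List.sum_map_add_int,
        PySem.List.sum_map_add_int,
        sum_guard _ _ _ (by omega), sum_guard _ _ _ (by omega),
        sum_guard _ _ _ (by omega), sum_guard _ _ _ (by omega)]
    simp only [cnt]
    ring
  · intro c i _
    simp only [indT, triCond]
    rw [Astep _ _ _ 1 1 i (by norm_num) (by norm_num),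
        Astep _ _ _ 1 2 i (by norm_num) (by norm_num),
        Astep _ _ _ 2 1 i (by norm_num) (by norm_num),
        Astep _ _ _ 2 2 i (by norm_num) (by norm_num)]
    ring

-- B equals the sum of the four per-offset counts
theorem trojki_alt_eq_cnt (T : List Int) :
    trojki_alt T = cnt T 1 1 + cnt T 1 2 + cnt T 2 1 + cnt T 2 2 := by
  unfold trojki_alt
  simp only [List.foldl_cons, List.foldl_nil]
  rw [Bblock T 1 1 (by norm_num) (by norm_num) (by norm_num) (by norm_num),
      Bblock T 1 2 (by norm_num) (by norm_num) (by norm_num) (by norm_num),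
      Bblock T 2 1 (by norm_num) (by norm_num) (by norm_num) (by norm_num),
      Bblock T 2 2 (by norm_num) (by norm_num) (by norm_num) (by norm_num)]
  ring

-- ===== VERDICT (by name: the statement is the Claim_ definition above) =====
theorem trojki_spec : Claim_equal_trojki := by
  intro T _
  unfold Spec_trojki
  rw [trojki_eq_cnt, trojki_alt_eq_cnt]
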